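-- pv_equiv track=rewrite | github.com/arisnoba/bnb-renewal | scripts/split_baewoo_sql.py | find_statement_end
-- ===== SOURCE A (Python) =====
-- def find_statement_end(
--     line: str, in_single_quote: bool, escaping: bool
-- ) -> tuple[int | None, bool, bool]:
--     for idx, ch in enumerate(line):
--         if in_single_quote:
--             if escaping:
--                 escaping = False
--                 continue
--             if ch == "\\":
--                 escaping = True
--                 continue
--             if ch == "'":
--                 in_single_quote = False
--             continue
--
--         if ch == "'":
--             in_single_quote = True
--             continue
--
--         if ch == ";":
--             return idx, in_single_quote, escaping
--
--     return None, in_single_quote, escaping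
-- ===== SOURCE B (Python) =====
-- def find_statement_end(
--     line: str, in_single_quote: bool, escaping: bool
-- ) -> tuple[int | None, bool, bool]:
--     n = len(line)
--     i = 0
--     if in_single_quote and escaping:
--         # a pending backslash escape consumes the first character
--         if n == 0:
--             return None, True, True
--         i = 1
--         escaping = False
--     while True:
--         if in_single_quote:
--             b = line.find("\\", i)
--             q = line.find("'", i)
--             if b != -1 and (q == -1 or b < q):
--                 if b == n - 1:
--                     return None, True, True
--                 i = b + 2
--             elif q == -1:
--                 return None, True, escaping
--             else:
--                 in_single_quote = False
--                 i = q + 1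
--         else:
--             s = line.find(";", i)
--             q = line.find("'", i)
--             if s != -1 and (q == -1 or s < q):
--                 return s, in_single_quote, escaping
--             if q == -1:
--                 return None, in_single_quote, escaping
--             in_single_quote = True
--             i = q + 1
-- ===== Notes on version B (the rewrite author's own statement) =====
-- stated objective: faster
-- what changed: Replaces A's per-character state-machine scan with a jump scan: each round uses str.find to locate the next relevant delimiter (backslash/quote inside a quote, semicolon/quote outside) and jumps straight to it, moving the inner character scan into C-level str.find.
-- outside the precondition, e.g. on find_statement_end("''", False, True): A returns (None, True, False), B returns (None, False, True)
import Mathlib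
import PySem

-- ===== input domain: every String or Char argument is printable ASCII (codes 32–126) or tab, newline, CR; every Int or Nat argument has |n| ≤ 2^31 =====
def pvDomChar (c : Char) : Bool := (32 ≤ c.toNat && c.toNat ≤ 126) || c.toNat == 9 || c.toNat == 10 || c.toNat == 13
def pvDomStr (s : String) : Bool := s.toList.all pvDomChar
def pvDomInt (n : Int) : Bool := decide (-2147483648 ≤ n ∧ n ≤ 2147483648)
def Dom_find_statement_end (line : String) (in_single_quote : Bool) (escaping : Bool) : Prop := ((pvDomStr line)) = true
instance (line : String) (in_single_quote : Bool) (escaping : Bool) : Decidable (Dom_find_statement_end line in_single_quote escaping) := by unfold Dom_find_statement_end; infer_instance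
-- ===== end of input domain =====

-- B replaces A's per-character flag-threading scan by a find-based jump scan (next relevant delimiter located, index jumps to it); same O(n) cost, different algorithm shape.


-- ===== PORT A =====
-- literal transliteration of A's for-loop with threaded (in_single_quote, escaping) state
def findA : List Char → Nat → Bool → Bool → Option Int × Bool × Bool
  | [], _, q, e => (none, q, e)
  | c :: rest, idx, q, e =>
    if q then
      if e then findA rest (idx + 1) q false
      else if c = '\\' then findA rest (idx + 1) q true
      else if c = '\'' then findA rest (idx + 1) false e
      else findA rest (idx + 1) q e
    else if c = '\'' then findA rest (idx + 1) true e
    else if c = ';' then (some (Int.ofNat idx), q, e)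
    else findA rest (idx + 1) q e
def find_statement_end (line : String) (in_single_quote : Bool) (escaping : Bool) : Option Int × Bool × Bool :=
  findA line.toList 0 in_single_quote escaping

-- ===== PORT B =====
-- index of the first occurrence of char c in l (none = Python's -1)
def charIdx : List Char → Char → Option Nat
  | [], _ => none
  | x :: rest, c => if x = c then some 0 else (charIdx rest c).map (· + 1)
-- exact port of line.find(c, i) for a one-character needle: first index ≥ i holding c, none = Python's -1
def charFind (cs : List Char) (c : Char) (i : Nat) : Option Nat :=
  (charIdx (cs.drop i) c).map (· + i)
theorem charIdx_lt {l : List Char} {c : Char} {k : Nat} (h : charIdx l c = some k) : k < l.length := by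
  induction l generalizing k with
  | nil => simp [charIdx] at h
  | cons x rest ih =>
    by_cases hx : x = c
    · simp [charIdx, hx] at h; simp; omega
    · simp [charIdx, hx] at h
      obtain ⟨m, hm, rfl⟩ := h
      have := ih hm; simp; omega
theorem charFind_lt_length {cs : List Char} {c : Char} {i j : Nat} (h : charFind cs c i = some j) :
    i ≤ j ∧ j < cs.length := by
  unfold charFind at h
  cases hz : charIdx (cs.drop i) c with
  | none => rw [hz] at h; simp at h
  | some k =>
    rw [hz] at h; simp at h
    have hk := charIdx_lt hz
    simp [List.length_drop] at hk
    omega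
def loopB (cs : List Char) (i : Nat) (q : Bool) (e : Bool) : Option Int × Bool × Bool :=
  if q then
    match hb : charFind cs '\\' i, hq : charFind cs '\'' i with
    | some bj, none =>
        if bj = cs.length - 1 then (none, true, true) else loopB cs (bj + 2) true e
    | some bj, some qj =>
        if bj < qj then
          (if bj = cs.length - 1 then (none, true, true) else loopB cs (bj + 2) true e)
        else loopB cs (qj + 1) false e
    | none, some qj => loopB cs (qj + 1) false e
    | none, none => (none, true, e)
  else
    match hs : charFind cs ';' i, hq : charFind cs '\'' i with
    | some sj, none => (some (Int.ofNat sj), false, e)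
    | some sj, some qj =>
        if sj < qj then (some (Int.ofNat sj), false, e) else loopB cs (qj + 1) true e
    | none, some qj => loopB cs (qj + 1) true e
    | none, none => (none, false, e)
termination_by cs.length - i
decreasing_by
  all_goals first
  | (have := charFind_lt_length hb; omega)
  | (have := charFind_lt_length hq; omega)


def find_statement_end_alt (line : String) (in_single_quote : Bool) (escaping : Bool) : Option Int × Bool × Bool :=
  if in_single_quote && escaping then
    if line.toList.isEmpty then (none, true, true)
    else loopB line.toList 1 true false   -- pending escape consumes the first character
  else loopB line.toList 0 in_single_quote escaping

-- ===== PRECONDITION & SPEC =====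
-- Pre_ excludes the inconsistent flag state escaping = true with in_single_quote = false when the line
-- contains a quote, on which A's carry-over of the stale escape flag into a quote opened later is accidental.
def Pre_find_statement_end (line : String) (in_single_quote : Bool) (escaping : Bool) : Prop :=
  in_single_quote = true ∨ escaping = false ∨ '\'' ∉ line.toList
instance (line : String) (in_single_quote : Bool) (escaping : Bool) : Decidable (Pre_find_statement_end line in_single_quote escaping) := by unfold Pre_find_statement_end; infer_instance

def pvWitness_find_statement_end : String × Bool × Bool := ("select 'a;b';", false, false)

def Spec_find_statement_end (line : String) (in_single_quote : Bool) (escaping : Bool) (out : Option Int × Bool × Bool) : Prop := out = find_statement_end_alt line in_single_quote escaping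
instance (line : String) (in_single_quote : Bool) (escaping : Bool) (out : Option Int × Bool × Bool) : Decidable (Spec_find_statement_end line in_single_quote escaping out) := by unfold Spec_find_statement_end; infer_instance

-- ===== CLAIM (what is proved, stated in full; the proofs are below) =====
def Claim_equal_find_statement_end : Prop := ∀ (line : String) (in_single_quote : Bool) (escaping : Bool), Dom_find_statement_end line in_single_quote escaping → Pre_find_statement_end line in_single_quote escaping → Spec_find_statement_end line in_single_quote escaping (find_statement_end line in_single_quote escaping)

-- ===== LEMMAS AND PROOFS =====
theorem charIdx_some {l : List Char} {c : Char} {k : Nat} (h : charIdx l c = some k) :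
    k < l.length ∧ l.drop k = c :: l.drop (k + 1) ∧ ∀ x ∈ l.take k, x ≠ c := by
  induction l generalizing k with
  | nil => simp [charIdx] at h
  | cons x rest ih =>
    by_cases hx : x = c
    · simp [charIdx, hx] at h
      subst hx
      simp [← h]
    · simp [charIdx, hx] at h
      obtain ⟨m, hm, rfl⟩ := h
      obtain ⟨h1, h2, h3⟩ := ih hm
      refine ⟨by simp; omega, by simpa using h2, ?_⟩
      intro y hy
      rcases (by simpa using hy : y = x ∨ y ∈ rest.take m) with rfl | hy'
      · exact hx
      · exact h3 y hy'
theorem charIdx_none {l : List Char} {c : Char} (h : charIdx l c = none) : ∀ x ∈ l, x ≠ c := by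
  induction l with
  | nil => simp
  | cons x rest ih =>
    by_cases hx : x = c
    · simp [charIdx, hx] at h
    · simp [charIdx, hx] at h
      intro y hy
      rcases (by simpa using hy : y = x ∨ y ∈ rest) with rfl | hy'
      · exact hx
      · exact ih h y hy'
theorem charFind_some {cs : List Char} {c : Char} {i j : Nat} (h : charFind cs c i = some j) :
    ∃ k, charIdx (cs.drop i) c = some k ∧ j = k + i := by
  unfold charFind at h
  cases hz : charIdx (cs.drop i) c with
  | none => rw [hz] at h; simp at h
  | some k => rw [hz] at h; simp at h; exact ⟨k, rfl, h.symm⟩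
theorem charFind_none {cs : List Char} {c : Char} {i : Nat} (h : charFind cs c i = none) :
    charIdx (cs.drop i) c = none := by
  unfold charFind at h
  cases hz : charIdx (cs.drop i) c with
  | none => rfl
  | some k => rw [hz] at h; simp at h
theorem findA_skip_out {t : List Char} (l : List Char) (idx : Nat) (e : Bool)
    (ht : ∀ x ∈ t, x ≠ '\'' ∧ x ≠ ';') :
    findA (t ++ l) idx false e = findA l (idx + t.length) false e := by
  induction t generalizing idx with
  | nil => simp
  | cons x rest ih =>
    have hx := ht x (by simp)
    have h2 := ih (idx := idx + 1) (fun y hy => ht y (by simp [hy]))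
    rw [List.cons_append, findA]
    simp only [Bool.false_eq_true, if_false, hx.1, hx.2, h2]
    congr 1
    simp; omega
theorem findA_skip_in {t : List Char} (l : List Char) (idx : Nat)
    (ht : ∀ x ∈ t, x ≠ '\'' ∧ x ≠ '\\') :
    findA (t ++ l) idx true false = findA l (idx + t.length) true false := by
  induction t generalizing idx with
  | nil => simp
  | cons x rest ih =>
    have hx := ht x (by simp)
    have h2 := ih (idx := idx + 1) (fun y hy => ht y (by simp [hy]))
    rw [List.cons_append, findA]
    simp only [if_true, Bool.false_eq_true, if_false, hx.1, hx.2, h2]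
    congr 1
    simp; omega
theorem findA_skip_out' (l : List Char) (idx m : Nat) (e : Bool)
    (ht : ∀ x ∈ l.take m, x ≠ '\'' ∧ x ≠ ';') (hm : m ≤ l.length) :
    findA l idx false e = findA (l.drop m) (idx + m) false e := by
  have := findA_skip_out (t := l.take m) (l.drop m) idx e ht
  rw [List.take_append_drop] at this
  simpa [List.length_take, Nat.min_eq_left hm] using this
theorem findA_skip_in' (l : List Char) (idx m : Nat)
    (ht : ∀ x ∈ l.take m, x ≠ '\'' ∧ x ≠ '\\') (hm : m ≤ l.length) :
    findA l idx true false = findA (l.drop m) (idx + m) true false := by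
  have := findA_skip_in (t := l.take m) (l.drop m) idx ht
  rw [List.take_append_drop] at this
  simpa [List.length_take, Nat.min_eq_left hm] using this
theorem mem_take_mono {α : Type} {l : List α} {m k : Nat} (h : m ≤ k) {x : α} (hx : x ∈ l.take m) : x ∈ l.take k := by
  have he : l.take m = (l.take k).take m := by rw [List.take_take, Nat.min_eq_left h]
  exact List.mem_of_mem_take (he ▸ hx)

theorem loopB_eq : ∀ (fuel : Nat) (cs : List Char) (i : Nat), cs.length - i ≤ fuel →
    ∀ q, loopB cs i q false = findA (cs.drop i) i q false := by
  intro fuel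
  induction fuel with
  | zero =>
    intro cs i h q
    have hd : cs.drop i = [] := List.drop_eq_nil_of_le (by omega)
    have hn : ∀ c, charFind cs c i = none := by
      intro c; unfold charFind; rw [hd]; rfl
    rw [loopB]
    cases q
    · rw [if_neg (by simp)]
      rw [hd]
      split <;> simp_all [findA]
    · rw [if_pos rfl]
      rw [hd]
      split <;> simp_all [findA]
  | succ fuel ih =>
    intro cs i h q
    have hlen : (cs.drop i).length = cs.length - i := by simp
    rw [loopB]
    cases q with
    | true =>
      rw [if_pos rfl]
      split
      · -- some bj, none : backslash only
        rename_i bj hb hq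
        obtain ⟨kb, hkb, rfl⟩ := charFind_some hb
        have hnq := charIdx_none (charFind_none hq)
        obtain ⟨hk1, hk2, hk3⟩ := charIdx_some hkb
        rw [findA_skip_in' (cs.drop i) i kb
          (fun x hx => ⟨hnq x (List.mem_of_mem_take hx), hk3 x hx⟩) (by omega), hk2]
        simp only [findA, Bool.false_eq_true, if_false, reduceIte]
        by_cases hend : kb + i = cs.length - 1
        · rw [if_pos hend]
          have hkend : (cs.drop i).drop (kb + 1) = [] := by
            apply List.drop_eq_nil_of_le; omega
          rw [hkend, findA]
        · rw [if_neg hend]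
          have hne : (cs.drop i).drop (kb + 1) ≠ [] := by
            intro hcon
            have := List.drop_eq_nil_iff.mp hcon
            omega
          obtain ⟨d, r, hdr⟩ := List.exists_cons_of_ne_nil hne
          rw [hdr]
          simp only [findA, Bool.false_eq_true, if_false, reduceIte]
          have hr : r = cs.drop (kb + i + 2) := by
            have : (cs.drop i).drop (kb + 2) = r := by
              rw [show kb + 2 = (kb + 1) + 1 from rfl, ← List.drop_drop, hdr, List.drop_one, List.tail_cons]
            rw [← this, List.drop_drop]
            congr 1; omega
          rw [hr, show i + kb + 1 + 1 = kb + i + 2 by omega]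
          exact ih cs (kb + i + 2) (by omega) true
      · -- some bj, some qj
        rename_i bj qj hb hq
        obtain ⟨kb, hkb, rfl⟩ := charFind_some hb
        obtain ⟨kq, hkq, rfl⟩ := charFind_some hq
        obtain ⟨hb1, hb2, hb3⟩ := charIdx_some hkb
        obtain ⟨hq1, hq2, hq3⟩ := charIdx_some hkq
        have hneq : kb ≠ kq := by
          intro hcon
          rw [hcon, hq2] at hb2
          exact absurd (List.cons_eq_cons.mp hb2).1 (by decide)
        by_cases hlt : kb + i < kq + i
        · rw [if_pos hlt]
          rw [findA_skip_in' (cs.drop i) i kb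
            (fun x hx => ⟨hq3 x (mem_take_mono (by omega) hx), hb3 x hx⟩) (by omega), hb2]
          simp only [findA, Bool.false_eq_true, if_false, reduceIte]
          by_cases hend : kb + i = cs.length - 1
          · rw [if_pos hend]
            have hkend : (cs.drop i).drop (kb + 1) = [] := by
              apply List.drop_eq_nil_of_le; omega
            rw [hkend, findA]
          · rw [if_neg hend]
            have hne : (cs.drop i).drop (kb + 1) ≠ [] := by
              intro hcon
              have := List.drop_eq_nil_iff.mp hcon
              omega
            obtain ⟨d, r, hdr⟩ := List.exists_cons_of_ne_nil hne
            rw [hdr]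
            simp only [findA, Bool.false_eq_true, if_false, reduceIte]
            have hr : r = cs.drop (kb + i + 2) := by
              have : (cs.drop i).drop (kb + 2) = r := by
                rw [show kb + 2 = (kb + 1) + 1 from rfl, ← List.drop_drop, hdr, List.drop_one, List.tail_cons]
              rw [← this, List.drop_drop]
              congr 1; omega
            rw [hr, show i + kb + 1 + 1 = kb + i + 2 by omega]
            exact ih cs (kb + i + 2) (by omega) true
        · rw [if_neg hlt]
          have hqb : kq < kb := by omega
          rw [findA_skip_in' (cs.drop i) i kq
            (fun x hx => ⟨hq3 x hx, hb3 x (mem_take_mono (by omega) hx)⟩) (by omega), hq2]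
          simp only [findA, Bool.false_eq_true, if_false, reduceIte]
          have hdd : (cs.drop i).drop (kq + 1) = cs.drop (kq + i + 1) := by
            rw [List.drop_drop]; congr 1; omega
          rw [hdd, show i + kq + 1 = kq + i + 1 by omega]
          exact ih cs (kq + i + 1) (by omega) false
      · -- none, some qj : quote closes
        rename_i qj hb hq
        obtain ⟨kq, hkq, rfl⟩ := charFind_some hq
        have hnb := charIdx_none (charFind_none hb)
        obtain ⟨hq1, hq2, hq3⟩ := charIdx_some hkq
        rw [findA_skip_in' (cs.drop i) i kq
          (fun x hx => ⟨hq3 x hx, hnb x (List.mem_of_mem_take hx)⟩) (by omega), hq2]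
        simp only [findA, Bool.false_eq_true, if_false, reduceIte]
        have hdd : (cs.drop i).drop (kq + 1) = cs.drop (kq + i + 1) := by
          rw [List.drop_drop]; congr 1; omega
        rw [hdd, show i + kq + 1 = kq + i + 1 by omega]
        exact ih cs (kq + i + 1) (by omega) false
      · -- none, none
        rename_i hb hq
        have hnb := charIdx_none (charFind_none hb)
        have hnq := charIdx_none (charFind_none hq)
        have := findA_skip_in (t := cs.drop i) [] i (fun x hx => ⟨hnq x hx, hnb x hx⟩)
        rw [List.append_nil] at this
        rw [this, findA]
    | false =>
      rw [if_neg (by simp)]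
      split
      · -- some sj, none : semicolon found
        rename_i sj hs hq
        obtain ⟨ks, hks, rfl⟩ := charFind_some hs
        have hnq := charIdx_none (charFind_none hq)
        obtain ⟨hs1, hs2, hs3⟩ := charIdx_some hks
        rw [findA_skip_out' (cs.drop i) i ks false
          (fun x hx => ⟨hnq x (List.mem_of_mem_take hx), hs3 x hx⟩) (by omega), hs2]
        simp only [findA, Bool.false_eq_true, if_false, reduceIte]
        rw [Nat.add_comm i ks, if_neg (show ¬(';' = '\'') from by decide)]
      · -- some sj, some qj
        rename_i sj qj hs hq
        obtain ⟨ks, hks, rfl⟩ := charFind_some hs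
        obtain ⟨kq, hkq, rfl⟩ := charFind_some hq
        obtain ⟨hs1, hs2, hs3⟩ := charIdx_some hks
        obtain ⟨hq1, hq2, hq3⟩ := charIdx_some hkq
        have hneq : ks ≠ kq := by
          intro hcon
          rw [hcon, hq2] at hs2
          exact absurd (List.cons_eq_cons.mp hs2).1 (by decide)
        by_cases hlt : ks + i < kq + i
        · rw [if_pos hlt]
          rw [findA_skip_out' (cs.drop i) i ks false
            (fun x hx => ⟨hq3 x (mem_take_mono (by omega) hx), hs3 x hx⟩) (by omega), hs2]
          simp only [findA, Bool.false_eq_true, if_false, reduceIte]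
          rw [Nat.add_comm i ks, if_neg (show ¬(';' = '\'') from by decide)]
        · rw [if_neg hlt]
          have hqs : kq < ks := by omega
          rw [findA_skip_out' (cs.drop i) i kq false
            (fun x hx => ⟨hq3 x hx, hs3 x (mem_take_mono (by omega) hx)⟩) (by omega), hq2]
          simp only [findA, Bool.false_eq_true, if_false, reduceIte]
          have hdd : (cs.drop i).drop (kq + 1) = cs.drop (kq + i + 1) := by
            rw [List.drop_drop]; congr 1; omega
          rw [hdd, show i + kq + 1 = kq + i + 1 by omega]
          exact ih cs (kq + i + 1) (by omega) true
      · -- none, some qj : quote opens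
        rename_i qj hs hq
        obtain ⟨kq, hkq, rfl⟩ := charFind_some hq
        have hns := charIdx_none (charFind_none hs)
        obtain ⟨hq1, hq2, hq3⟩ := charIdx_some hkq
        rw [findA_skip_out' (cs.drop i) i kq false
          (fun x hx => ⟨hq3 x hx, hns x (List.mem_of_mem_take hx)⟩) (by omega), hq2]
        simp only [findA, Bool.false_eq_true, if_false, reduceIte]
        have hdd : (cs.drop i).drop (kq + 1) = cs.drop (kq + i + 1) := by
          rw [List.drop_drop]; congr 1; omega
        rw [hdd, show i + kq + 1 = kq + i + 1 by omega]
        exact ih cs (kq + i + 1) (by omega) true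
      · -- none, none
        rename_i hs hq
        have hns := charIdx_none (charFind_none hs)
        have hnq := charIdx_none (charFind_none hq)
        have := findA_skip_out (t := cs.drop i) [] i false (fun x hx => ⟨hnq x hx, hns x hx⟩)
        rw [List.append_nil] at this
        rw [this, findA]

-- with no quote anywhere in the suffix, one jump round settles the scan even with a stale escape flag
theorem loopB_eq_noquote (cs : List Char) (i : Nat) (hnq : '\'' ∉ cs.drop i) :
    loopB cs i false true = findA (cs.drop i) i false true := by
  rw [loopB, if_neg (by simp)]
  split
  · -- some sj, none : semicolon found
    rename_i sj hs hq
    obtain ⟨ks, hks, rfl⟩ := charFind_some hs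
    have hnq' := charIdx_none (charFind_none hq)
    obtain ⟨hs1, hs2, hs3⟩ := charIdx_some hks
    rw [findA_skip_out' (cs.drop i) i ks true
      (fun x hx => ⟨hnq' x (List.mem_of_mem_take hx), hs3 x hx⟩) (by omega), hs2]
    simp only [findA, Bool.false_eq_true, if_false, reduceIte]
    rw [Nat.add_comm i ks, if_neg (show ¬(';' = '\'') from by decide)]
  · -- some sj, some qj : impossible, no quote in the suffix
    rename_i sj qj hs hq
    obtain ⟨kq, hkq, rfl⟩ := charFind_some hq
    obtain ⟨hq1, hq2, hq3⟩ := charIdx_some hkq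
    have hmem : '\'' ∈ (cs.drop i).drop kq := by rw [hq2]; exact List.mem_cons_self ..
    exact absurd (List.mem_of_mem_drop hmem) hnq
  · -- none, some qj : impossible, no quote in the suffix
    rename_i qj hs hq
    obtain ⟨kq, hkq, rfl⟩ := charFind_some hq
    obtain ⟨hq1, hq2, hq3⟩ := charIdx_some hkq
    have hmem : '\'' ∈ (cs.drop i).drop kq := by rw [hq2]; exact List.mem_cons_self ..
    exact absurd (List.mem_of_mem_drop hmem) hnq
  · -- none, none
    rename_i hs hq
    have hns := charIdx_none (charFind_none hs)
    have hnq' := charIdx_none (charFind_none hq)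
    have := findA_skip_out (t := cs.drop i) [] i true (fun x hx => ⟨hnq' x hx, hns x hx⟩)
    rw [List.append_nil] at this
    rw [this, findA]

-- ===== VERDICT (by name: the statement is the Claim_ definition above) =====
theorem find_statement_end_spec : Claim_equal_find_statement_end := by
  unfold Claim_equal_find_statement_end
  intro line q e _ hpre
  unfold Spec_find_statement_end find_statement_end find_statement_end_alt
  cases q with
  | false =>
    cases e with
    | true =>
      have hnq : '\'' ∉ line.toList := by
        rcases hpre with h | h | h
        · exact absurd h (by simp)
        · exact absurd h (by simp)
        · exact h
      rw [show (false && true) = false from rfl, if_neg (by decide)]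
      have := loopB_eq_noquote line.toList 0 (by simpa using hnq)
      rw [List.drop_zero] at this
      exact this.symm
    | false =>
      rw [show (false && false) = false from rfl, if_neg (by decide)]
      have := loopB_eq line.toList.length line.toList 0 (by omega) false
      rw [List.drop_zero] at this
      exact this.symm
  | true =>
    cases e with
    | false =>
      rw [show (true && false) = false from rfl, if_neg (by decide)]
      have := loopB_eq line.toList.length line.toList 0 (by omega) true
      rw [List.drop_zero] at this
      exact this.symm
    | true =>
      rw [show (true && true) = true from rfl, if_pos rfl]
      cases hcs : line.toList with
      | nil => rfl
      | cons c rest =>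
        rw [if_neg (by simp [hcs])]
        rw [findA]
        simp only [Bool.false_eq_true, if_false, reduceIte]
        have := loopB_eq line.toList.length line.toList 1 (by omega) true
        rw [hcs] at this
        simpa using this.symm
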